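-- pv_equiv track=rewrite | github.com/eliaspercy/error-correcting-codes | main.py | vectorToDecimal
-- ===== SOURCE A (Python) =====
-- def vectorToDecimal(j):
--     j = int("".join(map(str, j[0:len(j)])))
--     l = 0
--     r = len(str(j))+1
--     for i in range(0, r):
--         x = j%10
--         j = j//10
--         l = l + (x*(2**i))
--     return l
-- ===== SOURCE B (Python) =====
-- def vectorToDecimal(j):
--     n = int("".join(map(str, j)))
--     acc = 0
--     for ch in str(n):
--         acc = acc * 2 + int(ch)
--     return acc
-- ===== Notes on version B (the rewrite author's own statement) =====
-- stated objective: simpler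
-- what changed: B replaces A's least-significant-first mod//div loop with freshly recomputed 2**i weights (run for len(str(n))+1 iterations) by a single most-significant-first Horner pass (acc = acc*2 + digit) over the decimal string of the same parsed number, with no powers, no % and no //.
-- outside the precondition, e.g. on vectorToDecimal([-1]): A returns 63, B raises ValueError; on vectorToDecimal([]): A raises ValueError, B raises ValueError
import Mathlib
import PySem

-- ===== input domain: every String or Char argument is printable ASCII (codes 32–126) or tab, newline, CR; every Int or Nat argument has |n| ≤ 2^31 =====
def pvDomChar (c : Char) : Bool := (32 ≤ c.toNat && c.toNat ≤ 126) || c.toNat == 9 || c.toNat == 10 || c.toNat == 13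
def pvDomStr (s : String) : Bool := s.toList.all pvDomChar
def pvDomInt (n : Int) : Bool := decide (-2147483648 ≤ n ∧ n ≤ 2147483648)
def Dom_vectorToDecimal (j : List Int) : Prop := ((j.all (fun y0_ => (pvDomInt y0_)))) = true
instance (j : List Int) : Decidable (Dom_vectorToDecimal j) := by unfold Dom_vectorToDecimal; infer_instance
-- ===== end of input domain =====

-- B replaces A's least-significant-first mod//div loop with 2**i weights by a most-significant-first
-- Horner pass (acc = acc*2 + digit) over the decimal string of the same parsed number (objective: simpler).

-- ===== PORT A =====
def vectorToDecimal (j : List Int) : Int :=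
  -- j = int("".join(map(str, j[0:len(j)])))
  match PySem.Int.ofStr? (PySem.Str.join "" ((PySem.List.slice j (some 0) (some (j.length : Int))).map PySem.Int.toStr)) with
  | none => 0  -- Python raises ValueError here; excluded by Pre_
  | some n =>
    -- l = 0; r = len(str(j))+1; for i in range(0, r): x = j%10; j = j//10; l = l + (x*(2**i))
    let r : Int := PySem.Str.len (PySem.Int.toStr n) + 1
    ((PySem.List.pyRange 0 r 1).foldl
      (fun (s : Int × Int) (i : Int) =>
        let x := PySem.Int.mod s.1 10
        let jj := PySem.Int.floordiv s.1 10
        (jj, s.2 + x * 2 ^ i.toNat))  -- i comes from range(0, r), so i ≥ 0 and 2 ^ i.toNat is exactly 2**i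
      (n, 0)).2

-- ===== PORT B =====
def vectorToDecimal_alt (j : List Int) : Int :=
  -- n = int("".join(map(str, j)))
  match PySem.Int.ofStr? (PySem.Str.join "" (j.map PySem.Int.toStr)) with
  | none => 0  -- Python raises ValueError here; excluded by Pre_
  | some n =>
    -- acc = 0; for ch in str(n): acc = acc*2 + int(ch)
    (PySem.Int.toStr n).toList.foldl
      (fun acc c => acc * 2 + (PySem.Int.ofStr? (String.ofList [c])).getD 0) 0
      -- int(ch): .getD 0 is a totality guard; Python raises ValueError only on a non-digit ch, excluded by Pre_

-- ===== PRECONDITION & SPEC =====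
-- Pre_ excludes the empty list and lists containing a negative element: on [] (and on a negative
-- element in non-leading position) A raises ValueError, and on a negative first element B itself
-- raises ValueError (int('-') on the sign character of str(n)), so those inputs are outside the claim.
def Pre_vectorToDecimal (j : List Int) : Prop := j ≠ [] ∧ ∀ x ∈ j, 0 ≤ x
instance (j : List Int) : Decidable (Pre_vectorToDecimal j) := by unfold Pre_vectorToDecimal; infer_instance
def pvWitness_vectorToDecimal : List Int := [1, 0, 1]

def Spec_vectorToDecimal (j : List Int) (out : Int) : Prop := out = vectorToDecimal_alt j
instance (j : List Int) (out : Int) : Decidable (Spec_vectorToDecimal j out) := by unfold Spec_vectorToDecimal; infer_instance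

-- ===== CLAIM (what is proved, stated in full; the proofs are below) =====
def Claim_equal_vectorToDecimal : Prop := ∀ (j : List Int), Dom_vectorToDecimal j → Pre_vectorToDecimal j → Spec_vectorToDecimal j (vectorToDecimal j)

-- ===== LEMMAS AND PROOFS =====

def decDigits (m : Nat) : List Nat :=
  if m < 10 then [m] else decDigits (m / 10) ++ [m % 10]
decreasing_by exact Nat.div_lt_self (by omega) (by omega)

theorem toDigitsCore_eq (fuel : Nat) : ∀ (m : Nat) (acc : List Char), m < fuel →
    Nat.toDigitsCore 10 fuel m acc = (decDigits m).map Nat.digitChar ++ acc := by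
  induction fuel with
  | zero => intro m acc h; omega
  | succ f ih =>
    intro m acc h
    by_cases h10 : m < 10
    · have hz : m / 10 = 0 := Nat.div_eq_of_lt h10
      rw [Nat.toDigitsCore]
      simp [hz, decDigits, h10, Nat.mod_eq_of_lt h10]
    · have hz : ¬ m / 10 = 0 := by
        have := Nat.div_pos (by omega : 10 ≤ m) (by omega : 0 < 10); omega
      rw [Nat.toDigitsCore]
      simp only [hz]
      rw [ih (m / 10) _ (by have := Nat.div_lt_self (by omega : 0 < m) (by omega : 1 < 10); omega)]
      conv_rhs => rw [decDigits]
      simp [h10, List.append_assoc]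

theorem toChars_of_nonneg (n : Int) (h : 0 ≤ n) :
    PySem.Int.toChars n = (decDigits n.toNat).map Nat.digitChar := by
  simp only [PySem.Int.toChars, if_neg (by omega : ¬ n < 0), Nat.toDigits]
  rw [toDigitsCore_eq _ _ _ (by omega)]
  simp

theorem decDigits_mem_lt (m : Nat) : ∀ d ∈ decDigits m, d < 10 := by
  induction m using Nat.strong_induction_on with
  | _ m ih =>
    rw [decDigits]
    by_cases h10 : m < 10
    · simp [h10]
    · rw [if_neg h10]
      intro d hd
      rcases List.mem_append.1 hd with hd | hd
      · exact ih (m / 10) (Nat.div_lt_self (by omega) (by omega)) d hd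
      · simp at hd; omega

theorem decDigits_lt_pow (m : Nat) : m < 10 ^ (decDigits m).length := by
  induction m using Nat.strong_induction_on with
  | _ m ih =>
    rw [decDigits]
    by_cases h10 : m < 10
    · rw [if_pos h10]; simpa using h10
    · have h := ih (m / 10) (Nat.div_lt_self (by omega) (by omega))
      rw [if_neg h10]
      simp only [List.length_append, List.length_cons, List.length_nil]
      rw [pow_succ]
      have hdm : m < (m / 10 + 1) * 10 := by
        have := Nat.div_add_mod m 10
        have := Nat.mod_lt m (by omega : 0 < 10)
        omega
      nlinarith [pow_pos (by omega : (0:Nat) < 10) (decDigits (m / 10)).length]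

def fDec (m : Nat) : Int :=
  if m = 0 then 0 else 2 * fDec (m / 10) + (m % 10 : Nat)
decreasing_by exact Nat.div_lt_self (by omega) (by omega)

def fBnd : Nat → Nat → Int
  | 0, _ => 0
  | r + 1, m => (m % 10 : Nat) + 2 * fBnd r (m / 10)

theorem fBnd_zero (r : Nat) : fBnd r 0 = 0 := by
  induction r with
  | zero => rfl
  | succ r ih => simp [fBnd, ih]

theorem fBnd_eq_fDec (r : Nat) : ∀ m : Nat, m < 10 ^ r → fBnd r m = fDec m := by
  induction r with
  | zero => intro m hm; interval_cases m; simp [fBnd, fDec]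
  | succ r ih =>
    intro m hm
    by_cases h0 : m = 0
    · subst h0; rw [fBnd_zero]; simp [fDec]
    · rw [fDec, if_neg h0]
      have : m / 10 < 10 ^ r := by
        rw [Nat.div_lt_iff_lt_mul (by omega)]
        calc m < 10 ^ (r+1) := hm
        _ = 10 ^ r * 10 := by rw [pow_succ]
      rw [fBnd, ih _ this]; ring

theorem horner_decDigits (m : Nat) :
    (decDigits m).foldl (fun (acc : Int) (d : Nat) => acc * 2 + (d : Int)) 0 = fDec m := by
  induction m using Nat.strong_induction_on with
  | _ m ih =>
    rw [decDigits]
    by_cases h10 : m < 10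
    · by_cases h0 : m = 0
      · subst h0; simp [fDec]
      · rw [if_pos h10]
        show (0 * 2 + (m : Int)) = fDec m
        rw [fDec, if_neg h0]
        have hz : m / 10 = 0 := Nat.div_eq_of_lt h10
        rw [hz]
        rw [fDec]
        simp [Nat.mod_eq_of_lt h10]
    · have h0 : ¬ m = 0 := by omega
      rw [if_neg h10]
      rw [List.foldl_append]
      show ((decDigits (m / 10)).foldl (fun (acc : Int) (d : Nat) => acc * 2 + (d : Int)) 0) * 2 + ((m % 10 : Nat) : Int) = fDec m
      rw [ih (m / 10) (Nat.div_lt_self (by omega) (by omega))]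
      conv_rhs => rw [fDec]
      rw [if_neg h0]
      ring

theorem mod10_cast (m : Nat) : PySem.Int.mod (m : Int) 10 = ((m % 10 : Nat) : Int) := by
  simp [PySem.Int.mod, Int.fmod_eq_emod]

theorem div10_cast (m : Nat) : PySem.Int.floordiv (m : Int) 10 = ((m / 10 : Nat) : Int) := by
  have h := PySem.Int.floordiv_natCast m 10
  have : ((10 : Nat) : Int) = (10 : Int) := by norm_num
  rw [this] at h
  exact h

theorem loopA (r : Nat) : ∀ (k m : Nat) (l : Int),
    (PySem.List.pyRange (k : Int) ((k : Int) + (r : Int)) 1).foldl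
      (fun (s : Int × Int) (i : Int) =>
        let x := PySem.Int.mod s.1 10
        let jj := PySem.Int.floordiv s.1 10
        (jj, s.2 + x * 2 ^ i.toNat))
      ((m : Int), l)
    = (((m / 10 ^ r : Nat) : Int), l + 2 ^ k * fBnd r m) := by
  induction r with
  | zero =>
    intro k m l
    have h0 : (k : Int) + ((0 : Nat) : Int) = (k : Int) := by push_cast; ring
    rw [h0]
    simp [PySem.List.pyRange, fBnd]
  | succ r ih =>
    intro k m l
    have hlt : (k : Int) < (k : Int) + ((r + 1 : Nat) : Int) := by push_cast; omega
    rw [PySem.List.pyRange_one_cons hlt]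
    simp only [List.foldl_cons]
    have hb : (k : Int) + ((r + 1 : Nat) : Int) = ((k + 1 : Nat) : Int) + ((r : Nat) : Int) := by
      push_cast; ring
    have hk1 : (k : Int) + 1 = ((k + 1 : Nat) : Int) := by push_cast; ring
    simp only [mod10_cast, div10_cast, hb, hk1, Int.toNat_natCast]
    rw [ih (k + 1) (m / 10) (l + ((m % 10 : Nat) : Int) * 2 ^ k)]
    rw [Prod.mk.injEq]
    constructor
    · rw [Nat.div_div_eq_div_mul]
      congr 2
      rw [pow_succ]
      ring
    · show l + ((m % 10 : Nat) : Int) * 2 ^ k + 2 ^ (k + 1) * fBnd r (m / 10)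
        = l + 2 ^ k * fBnd (r + 1) m
      rw [fBnd]
      ring

theorem digitChar_int (d : Nat) (hd : d < 10) :
    (PySem.Int.ofStr? (String.ofList [Nat.digitChar d])).getD 0 = (d : Int) := by
  interval_cases d <;> decide

theorem digitChar_not_sign (d : Nat) (hd : d < 10) :
    Nat.digitChar d ≠ '-' ∧ Nat.digitChar d ≠ '+' ∧ PySem.Int.isIntSpace (Nat.digitChar d) = false := by
  interval_cases d <;> decide

theorem horner_map (ds : List Nat) : ∀ a : Int, (∀ d ∈ ds, d < 10) →
    (ds.map Nat.digitChar).foldl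
      (fun acc c => acc * 2 + (PySem.Int.ofStr? (String.ofList [c])).getD 0) a
    = ds.foldl (fun (acc : Int) (d : Nat) => acc * 2 + (d : Int)) a := by
  induction ds with
  | nil => intro a h; rfl
  | cons d ds ih =>
    intro a h
    simp only [List.map_cons, List.foldl_cons]
    rw [digitChar_int d (h d (by simp))]
    exact ih _ (fun x hx => h x (by simp [hx]))

theorem dropWhile_eq_self_of (p : Char → Bool) (cs : List Char) (h : ∀ c ∈ cs, p c = false) :
    List.dropWhile p cs = cs := by
  cases cs with
  | nil => rfl
  | cons c cs => rw [List.dropWhile_cons_of_neg (by simp [h c (by simp)])]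


theorem bind_cast_nonneg (o : Option Nat) (a : Int)
    (h : (do let x ← o; some ((x : Nat) : Int)) = some a) : 0 ≤ a := by
  cases o with
  | none => simp at h
  | some b => injection h with h; omega

theorem ofChars?_digit_nonneg (cs : List Char) (n : Int)
    (hds : ∀ c ∈ cs, ∃ d, d < 10 ∧ c = Nat.digitChar d)
    (h : PySem.Int.ofChars? cs = some n) : 0 ≤ n := by
  have hsp : ∀ c ∈ cs, PySem.Int.isIntSpace c = false := by
    intro c hc
    obtain ⟨d, hd, rfl⟩ := hds c hc
    exact (digitChar_not_sign d hd).2.2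
  unfold PySem.Int.ofChars? at h
  rw [dropWhile_eq_self_of _ _ hsp] at h
  rw [dropWhile_eq_self_of _ _ (by intro c hc; exact hsp c (by simpa using hc))] at h
  rw [List.reverse_reverse] at h
  rcases cs with _ | ⟨c, cs'⟩
  · simp only [Option.map_eq_some_iff] at h
    obtain ⟨a, ha, rfl⟩ := h
    simp only [Option.pure_def] at ha
    exact bind_cast_nonneg _ _ ha
  · obtain ⟨d, hd, rfl⟩ := hds c (by simp)
    dsimp only [] at h
    split at h
    next ds heq =>
      have hc : Nat.digitChar d = '-' := by injection heq
      exact absurd hc (digitChar_not_sign d hd).1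
    next ds heq =>
      have hc : Nat.digitChar d = '+' := by injection heq
      exact absurd hc (digitChar_not_sign d hd).2.1
    next h1 h2 =>
      simp only [Option.map_eq_some_iff] at h
      obtain ⟨a, ha, rfl⟩ := h
      simp only [Option.pure_def] at ha
      exact bind_cast_nonneg _ _ ha

theorem join_nil_flatten (ls : List (List Char)) : PySem.Chars.join [] ls = ls.flatten := by
  simp only [PySem.Chars.join, List.intercalate]
  induction ls with
  | nil => rfl
  | cons a ls ih =>
    cases ls with
    | nil => simp
    | cons b ls' =>
      rw [List.intersperse_cons₂]
      simp only [List.flatten_cons] at *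
      simp [ih]

theorem joined_digits (j : List Int) (hj : ∀ x ∈ j, 0 ≤ x) :
    ∀ c ∈ PySem.Chars.join [] (j.map (fun x => (PySem.Int.toStr x).toList)), ∃ d, d < 10 ∧ c = Nat.digitChar d := by
  intro c hc
  rw [join_nil_flatten] at hc
  obtain ⟨l, hl, hcl⟩ := List.mem_flatten.1 hc
  obtain ⟨x, hx, rfl⟩ := List.mem_map.1 hl
  rw [PySem.Int.toList_toStr, toChars_of_nonneg x (hj x hx)] at hcl
  obtain ⟨d, hd, rfl⟩ := List.mem_map.1 hcl
  exact ⟨d, decDigits_mem_lt x.toNat d hd, rfl⟩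

theorem vectorToDecimal_eq_alt (j : List Int) (hpos : ∀ x ∈ j, 0 ≤ x) :
    vectorToDecimal j = vectorToDecimal_alt j := by
  unfold vectorToDecimal vectorToDecimal_alt
  have hslice : PySem.List.slice j (some 0) (some (j.length : Int)) = j := by
    rw [PySem.List.slice_zero_start, PySem.List.slice_to_natCast, List.take_length]
  rw [hslice]
  cases hcase : PySem.Int.ofStr? (PySem.Str.join "" (j.map PySem.Int.toStr)) with
  | none => rfl
  | some n =>
    have hjoin : PySem.Str.join "" (j.map PySem.Int.toStr)
        = String.ofList (PySem.Chars.join [] (j.map (fun x => (PySem.Int.toStr x).toList))) := by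
      simp only [PySem.Str.join, List.map_map]
      rfl
    have hn : 0 ≤ n := by
      apply ofChars?_digit_nonneg _ n (joined_digits j hpos)
      rw [← PySem.Int.ofStr?_ofList, ← hjoin]
      exact hcase
    obtain ⟨m, rfl⟩ := Int.eq_ofNat_of_zero_le hn
    -- A side
    have hchars : PySem.Int.toChars (m : Int) = (decDigits m).map Nat.digitChar := by
      simpa using toChars_of_nonneg (m : Int) (by omega)
    have hlen : PySem.Str.len (PySem.Int.toStr (m : Int)) = ((decDigits m).length : Int) := by
      rw [PySem.Str.len, PySem.Int.toList_toStr, hchars]; simp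
    set L := (decDigits m).length with hL
    have hr : PySem.Str.len (PySem.Int.toStr (m : Int)) + 1 = ((0 : Nat) : Int) + ((L + 1 : Nat) : Int) := by
      rw [hlen]; push_cast; ring
    simp only [hr]
    have hA := loopA (L + 1) 0 m 0
    simp only [Int.natCast_zero] at hA ⊢
    rw [hA]
    have hmlt : m < 10 ^ (L + 1) := by
      have h1 := decDigits_lt_pow m
      have h2 : (10:Nat) ^ L ≤ 10 ^ (L+1) := Nat.pow_le_pow_right (by omega) (by omega)
      rw [← hL] at h1
      omega
    -- B side
    rw [PySem.Int.toList_toStr, hchars, horner_map _ _ (decDigits_mem_lt m), horner_decDigits]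
    rw [fBnd_eq_fDec _ _ hmlt]
    ring

-- ===== VERDICT (by name: the statement is the Claim_ definition above) =====
theorem vectorToDecimal_spec : Claim_equal_vectorToDecimal := by
  intro j _ hpre
  unfold Spec_vectorToDecimal
  exact vectorToDecimal_eq_alt j hpre.2
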